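-- pv_equiv track=rewrite | github.com/KNU-HAEDAL/2024-SS-small-group-ALSol | HSKIM/1to10/10.py | searching
-- ===== SOURCE A (Python) =====
-- def searching(s):
--     # [] {} () 의미
--     arr = [0, 0, 0]
--
--     for i in range(len(s)):
--         if s[i] == ')' and arr[2] != 1:
--             arr[2] = -1
--             break
--         elif s[i] == '}' and arr[1] != 1:
--             arr[1] = -1
--             break
--         elif s[i] == ']' and arr[0] != 1:
--             arr[0] = -1
--             break
--
--         for j in range(i + 1, len(s)):
--             if s[i] == '(' and s[j] == ')':
--                 arr[2] = 1
--                 break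
--             elif s[i] == '{' and s[j] == '}':
--                 arr[1] = 1
--                 break
--             elif s[i] == '[' and s[j] == ']':
--                 arr[0] = 1
--                 break
--
--     if -1 in arr:
--         return 0
--     else:
--         return 1
-- ===== SOURCE B (Python) =====
-- def searching(s):
--     # One O(n) pass: a closer is fine iff a matching opener appeared earlier.
--     seen_sq = seen_br = seen_pa = False
--     for c in s:
--         if c == ']':
--             if not seen_sq:
--                 return 0
--         elif c == '}':
--             if not seen_br:
--                 return 0
--         elif c == ')':
--             if not seen_pa:
--                 return 0
--         elif c == '[':
--             seen_sq = True
--         elif c == '{':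
--             seen_br = True
--         elif c == '(':
--             seen_pa = True
--     return 1
-- ===== Notes on version B (the rewrite author's own statement) =====
-- stated objective: faster
-- what changed: Replaced the quadratic nested lookahead/flag machinery by a single left-to-right pass keeping one seen-opener boolean per bracket kind: a closer is valid iff its opener was already seen, which coincides with A's flag at exactly the moments A tests it.
import Mathlib
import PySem

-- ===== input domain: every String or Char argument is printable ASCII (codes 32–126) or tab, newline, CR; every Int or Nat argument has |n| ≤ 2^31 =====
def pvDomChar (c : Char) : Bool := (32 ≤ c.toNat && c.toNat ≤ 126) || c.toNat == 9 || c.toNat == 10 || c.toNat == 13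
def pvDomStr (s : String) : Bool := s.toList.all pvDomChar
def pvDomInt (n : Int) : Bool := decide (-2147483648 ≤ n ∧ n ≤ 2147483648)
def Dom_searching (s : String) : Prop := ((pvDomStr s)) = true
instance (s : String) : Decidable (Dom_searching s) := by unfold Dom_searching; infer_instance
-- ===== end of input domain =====

-- B replaces A's nested lookahead by a single pass with three seen-opener booleans.

-- ===== PORT A =====
-- inner for-j loop: scans the suffix after position i, stops at the first match
def pvInner (c : Char) : List Char → Int × Int × Int → Int × Int × Int
  | [], arr => arr
  | d :: t, arr =>
    if c = '(' ∧ d = ')' then (arr.1, arr.2.1, 1)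
    else if c = '{' ∧ d = '}' then (arr.1, 1, arr.2.2)
    else if c = '[' ∧ d = ']' then (1, arr.2.1, arr.2.2)
    else pvInner c t arr

-- outer for-i loop; a break returns the array as it stands
def pvOuter : List Char → Int × Int × Int → Int × Int × Int
  | [], arr => arr
  | c :: t, arr =>
    if c = ')' ∧ arr.2.2 ≠ 1 then (arr.1, arr.2.1, -1)
    else if c = '}' ∧ arr.2.1 ≠ 1 then (arr.1, -1, arr.2.2)
    else if c = ']' ∧ arr.1 ≠ 1 then (-1, arr.2.1, arr.2.2)
    else pvOuter t (pvInner c t arr)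

def searching (s : String) : Int :=
  let arr := pvOuter s.toList (0, 0, 0)
  if arr.1 = -1 ∨ arr.2.1 = -1 ∨ arr.2.2 = -1 then 0 else 1

-- ===== PORT B =====
def pvAltAux : List Char → Bool → Bool → Bool → Int
  | [], _, _, _ => 1
  | c :: t, sq, br, pa =>
    if c = ']' then (if sq then pvAltAux t sq br pa else 0)
    else if c = '}' then (if br then pvAltAux t sq br pa else 0)
    else if c = ')' then (if pa then pvAltAux t sq br pa else 0)
    else if c = '[' then pvAltAux t true br pa
    else if c = '{' then pvAltAux t sq true pa
    else if c = '(' then pvAltAux t sq br true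
    else pvAltAux t sq br pa

def searching_alt (s : String) : Int := pvAltAux s.toList false false false

-- ===== PRECONDITION & SPEC =====
def Spec_searching (s : String) (out : Int) : Prop := out = searching_alt s
instance (s : String) (out : Int) : Decidable (Spec_searching s out) := by unfold Spec_searching; infer_instance

-- ===== CLAIM (what is proved, stated in full; the proofs are below) =====
def Claim_equal_searching : Prop := ∀ (s : String), Dom_searching s → Spec_searching s (searching s)

-- ===== LEMMAS AND PROOFS =====

-- relation between one of A's flags (never -1 while looping) and B's seen-opener boolean
def pvInv (a : Int) (b : Bool) (cl : Char) (l : List Char) : Prop :=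
  (a = 0 ∨ a = 1) ∧ (a = 1 → b = true) ∧ (b = true → cl ∈ l → a = 1)

lemma pvInv_tail {a : Int} {b : Bool} {cl c : Char} {t : List Char}
    (h : pvInv a b cl (c :: t)) : pvInv a b cl t :=
  ⟨h.1, h.2.1, fun hb hm => h.2.2 hb (List.mem_cons_of_mem _ hm)⟩

lemma pvInner_par (t : List Char) (arr : Int × Int × Int) :
    pvInner '(' t arr = if ')' ∈ t then (arr.1, arr.2.1, 1) else arr := by
  induction t with
  | nil => simp [pvInner]
  | cons d t ih =>
    by_cases h : d = ')'
    · simp [pvInner, h]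
    · have h' : ¬(')' = d) := fun e => h e.symm
      simp [pvInner, h, h', ih]

lemma pvInner_br (t : List Char) (arr : Int × Int × Int) :
    pvInner '{' t arr = if '}' ∈ t then (arr.1, 1, arr.2.2) else arr := by
  induction t with
  | nil => simp [pvInner]
  | cons d t ih =>
    by_cases h : d = '}'
    · simp [pvInner, h]
    · have h' : ¬('}' = d) := fun e => h e.symm
      simp [pvInner, h, h', ih]

lemma pvInner_sq (t : List Char) (arr : Int × Int × Int) :
    pvInner '[' t arr = if ']' ∈ t then (1, arr.2.1, arr.2.2) else arr := by
  induction t with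
  | nil => simp [pvInner]
  | cons d t ih =>
    by_cases h : d = ']'
    · simp [pvInner, h]
    · have h' : ¬(']' = d) := fun e => h e.symm
      simp [pvInner, h, h', ih]

lemma pvInner_none (c : Char) (h1 : c ≠ '(') (h2 : c ≠ '{') (h3 : c ≠ '[')
    (t : List Char) (arr : Int × Int × Int) : pvInner c t arr = arr := by
  induction t with
  | nil => simp [pvInner]
  | cons d t ih => simp [pvInner, h1, h2, h3, ih]

lemma pv_key : ∀ (l : List Char) (arr : Int × Int × Int) (sq br pa : Bool),
    pvInv arr.1 sq ']' l → pvInv arr.2.1 br '}' l → pvInv arr.2.2 pa ')' l →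
    (if (pvOuter l arr).1 = -1 ∨ (pvOuter l arr).2.1 = -1 ∨ (pvOuter l arr).2.2 = -1
      then (0 : Int) else 1) = pvAltAux l sq br pa := by
  intro l
  induction l with
  | nil =>
    intro arr sq br pa h0 h1 h2
    have hne : ¬ (arr.1 = -1 ∨ arr.2.1 = -1 ∨ arr.2.2 = -1) := by
      rcases h0.1 with h | h <;> rcases h1.1 with h' | h' <;> rcases h2.1 with h'' | h'' <;>
        simp [h, h', h'']
    simp [pvOuter, pvAltAux, hne]
  | cons c t ih =>
    intro arr sq br pa h0 h1 h2
    by_cases hc2 : c = ')'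
    · subst hc2
      by_cases hfl : arr.2.2 = 1
      · have hb : pa = true := h2.2.1 hfl
        have hstep : pvOuter (')' :: t) arr = pvOuter t arr := by
          rw [pvOuter, if_neg (by simp [hfl]), if_neg (by simp), if_neg (by simp),
              pvInner_none _ (by decide) (by decide) (by decide)]
        have halt : pvAltAux (')' :: t) sq br pa = pvAltAux t sq br pa := by
          rw [pvAltAux]; simp [hb]
        rw [hstep, halt]
        exact ih arr sq br pa (pvInv_tail h0) (pvInv_tail h1) ⟨h2.1, h2.2.1, fun _ _ => hfl⟩
      · have hb : pa = false := by
          cases hpa : pa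
          · rfl
          · exact absurd (h2.2.2 hpa (List.mem_cons_self)) hfl
        rw [show pvOuter (')' :: t) arr = (arr.1, arr.2.1, -1) from by
              rw [pvOuter, if_pos ⟨rfl, hfl⟩],
            show pvAltAux (')' :: t) sq br pa = 0 from by rw [pvAltAux]; simp [hb]]
        simp
    · by_cases hc1 : c = '}'
      · subst hc1
        by_cases hfl : arr.2.1 = 1
        · have hb : br = true := h1.2.1 hfl
          have hstep : pvOuter ('}' :: t) arr = pvOuter t arr := by
            rw [pvOuter, if_neg (by simp), if_neg (by simp [hfl]), if_neg (by simp),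
                pvInner_none _ (by decide) (by decide) (by decide)]
          have halt : pvAltAux ('}' :: t) sq br pa = pvAltAux t sq br pa := by
            rw [pvAltAux]; simp [hb]
          rw [hstep, halt]
          exact ih arr sq br pa (pvInv_tail h0) ⟨h1.1, h1.2.1, fun _ _ => hfl⟩ (pvInv_tail h2)
        · have hb : br = false := by
            cases hbr : br
            · rfl
            · exact absurd (h1.2.2 hbr (List.mem_cons_self)) hfl
          rw [show pvOuter ('}' :: t) arr = (arr.1, -1, arr.2.2) from by
                rw [pvOuter, if_neg (by simp), if_pos ⟨rfl, hfl⟩],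
              show pvAltAux ('}' :: t) sq br pa = 0 from by rw [pvAltAux]; simp [hb]]
          simp
      · by_cases hc0 : c = ']'
        · subst hc0
          by_cases hfl : arr.1 = 1
          · have hb : sq = true := h0.2.1 hfl
            have hstep : pvOuter (']' :: t) arr = pvOuter t arr := by
              rw [pvOuter, if_neg (by simp), if_neg (by simp), if_neg (by simp [hfl]),
                  pvInner_none _ (by decide) (by decide) (by decide)]
            have halt : pvAltAux (']' :: t) sq br pa = pvAltAux t sq br pa := by
              rw [pvAltAux]; simp [hb]
            rw [hstep, halt]
            exact ih arr sq br pa ⟨h0.1, h0.2.1, fun _ _ => hfl⟩ (pvInv_tail h1) (pvInv_tail h2)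
          · have hb : sq = false := by
              cases hsq : sq
              · rfl
              · exact absurd (h0.2.2 hsq (List.mem_cons_self)) hfl
            rw [show pvOuter (']' :: t) arr = (-1, arr.2.1, arr.2.2) from by
                  rw [pvOuter, if_neg (by simp), if_neg (by simp), if_pos ⟨rfl, hfl⟩],
                show pvAltAux (']' :: t) sq br pa = 0 from by rw [pvAltAux]; simp [hb]]
            simp
        · -- c is not a closer: outer falls through to the inner loop
          have hstep : pvOuter (c :: t) arr = pvOuter t (pvInner c t arr) := by
            rw [pvOuter, if_neg (by simp [hc2]), if_neg (by simp [hc1]), if_neg (by simp [hc0])]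
          rw [hstep]
          by_cases hp : c = '('
          · subst hp
            have halt : pvAltAux ('(' :: t) sq br pa = pvAltAux t sq br true := by
              rw [pvAltAux]; simp
            rw [halt, pvInner_par]
            by_cases hm : ')' ∈ t
            · rw [if_pos hm]
              exact ih (arr.1, arr.2.1, 1) sq br true (pvInv_tail h0) (pvInv_tail h1)
                ⟨Or.inr rfl, fun _ => rfl, fun _ _ => rfl⟩
            · rw [if_neg hm]
              exact ih arr sq br true (pvInv_tail h0) (pvInv_tail h1)
                ⟨h2.1, fun _ => rfl, fun _ hmem => absurd hmem hm⟩
          · by_cases hq : c = '{'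
            · subst hq
              have halt : pvAltAux ('{' :: t) sq br pa = pvAltAux t sq true pa := by
                rw [pvAltAux]; simp
              rw [halt, pvInner_br]
              by_cases hm : '}' ∈ t
              · rw [if_pos hm]
                exact ih (arr.1, 1, arr.2.2) sq true pa (pvInv_tail h0)
                  ⟨Or.inr rfl, fun _ => rfl, fun _ _ => rfl⟩ (pvInv_tail h2)
              · rw [if_neg hm]
                exact ih arr sq true pa (pvInv_tail h0)
                  ⟨h1.1, fun _ => rfl, fun _ hmem => absurd hmem hm⟩ (pvInv_tail h2)
            · by_cases hr : c = '['
              · subst hr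
                have halt : pvAltAux ('[' :: t) sq br pa = pvAltAux t true br pa := by
                  rw [pvAltAux]; simp
                rw [halt, pvInner_sq]
                by_cases hm : ']' ∈ t
                · rw [if_pos hm]
                  exact ih (1, arr.2.1, arr.2.2) true br pa
                    ⟨Or.inr rfl, fun _ => rfl, fun _ _ => rfl⟩ (pvInv_tail h1) (pvInv_tail h2)
                · rw [if_neg hm]
                  exact ih arr true br pa
                    ⟨h0.1, fun _ => rfl, fun _ hmem => absurd hmem hm⟩ (pvInv_tail h1)
                    (pvInv_tail h2)
              · -- c is no bracket at all: nothing changes on either side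
                have halt : pvAltAux (c :: t) sq br pa = pvAltAux t sq br pa := by
                  rw [pvAltAux]; simp [hc0, hc1, hc2, hr, hq, hp]
                rw [halt, pvInner_none c hp hq hr]
                exact ih arr sq br pa (pvInv_tail h0) (pvInv_tail h1) (pvInv_tail h2)

-- ===== VERDICT (by name: the statement is the Claim_ definition above) =====
theorem searching_spec : Claim_equal_searching := by
  intro s _
  unfold Spec_searching searching searching_alt
  exact pv_key s.toList (0, 0, 0) false false false
    ⟨Or.inl rfl, by simp, by simp⟩ ⟨Or.inl rfl, by simp, by simp⟩ ⟨Or.inl rfl, by simp, by simp⟩
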